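-- pv_equiv track=rewrite | github.com/L1nwatch/CTF | IDF 实验室/PPC初探乾坤/谁是卧底/count_position.py | count_position
-- ===== SOURCE A (Python) =====
-- def count_position(positions):
--     counts = []
--
--     length = len(positions)
--     for i in range(length):
--         count = 0
--         temp = positions[i:]
--         for each in temp:
--             if each > (positions[i] + 100):
--                 break
--             else:
--                 count += 1
--         counts.append(count)
--
--     return counts
-- ===== SOURCE B (Python) =====
-- def count_position(positions):
--     # Right-to-left pass keeping the strict "record" elements of the suffix
--     # (each record is greater than every element between it and the current
--     # index); the first element exceeding positions[i] + 100 is always such a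
--     # record, and record values grow with distance, so a binary search over the
--     # stack finds it.  O(n log n) instead of A's quadratic rescan.
--     n = len(positions)
--     counts = [0] * n
--     stack = []  # (value, index) records of the suffix; end of list = nearest, values grow toward the front
--     for i in range(n - 1, -1, -1):
--         t = positions[i] + 100
--         m = len(stack)
--         lo, hi = 0, m
--         while lo < hi:  # find smallest e with stack[m-1-e][0] > t
--             mid = (lo + hi) // 2
--             if t < stack[m - 1 - mid][0]:
--                 hi = mid
--             else:
--                 lo = mid + 1
--         if lo < m:
--             counts[i] = stack[m - 1 - lo][1] - i
--         else:
--             counts[i] = n - i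
--         while stack and stack[-1][0] <= positions[i]:
--             stack.pop()
--         stack.append((positions[i], i))
--     return counts
-- ===== Notes on version B (the rewrite author's own statement) =====
-- stated objective: faster
-- what changed: Replaces A's per-index rescan of the whole suffix by one right-to-left pass that maintains a monotonic stack of suffix record elements and binary-searches it for the first element exceeding positions[i]+100.
import Mathlib
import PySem

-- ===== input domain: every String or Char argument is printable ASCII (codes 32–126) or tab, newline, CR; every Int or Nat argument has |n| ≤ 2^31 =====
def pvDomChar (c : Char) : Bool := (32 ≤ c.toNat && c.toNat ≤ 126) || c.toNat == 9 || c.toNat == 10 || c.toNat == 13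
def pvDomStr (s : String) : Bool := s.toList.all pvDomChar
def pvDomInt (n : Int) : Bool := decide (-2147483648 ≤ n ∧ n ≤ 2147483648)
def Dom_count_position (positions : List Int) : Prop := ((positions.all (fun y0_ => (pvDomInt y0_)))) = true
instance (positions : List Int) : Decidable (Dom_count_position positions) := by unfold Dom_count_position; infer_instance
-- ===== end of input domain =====

-- B replaces A's quadratic per-index suffix rescan by a right-to-left monotonic record stack
-- with a binary search per index (objective: faster, O(n log n) vs O(n^2)).

-- ===== PORT A =====
-- inner 'for each in temp: if each > bound: break else count += 1'
def cpA_inner (temp : List Int) (bound : Int) (count : Int) : Int :=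
  match temp with
  | [] => count
  | each :: rest => if each > bound then count else cpA_inner rest bound (count + 1)

def count_position (positions : List Int) : List Int :=
  let length : Int := positions.length
  (PySem.List.pyRange 0 length 1).foldl
    (fun counts i =>
      let temp := PySem.List.slice positions (some i) none
      counts ++ [cpA_inner temp (PySem.List.pyGetD positions i 0 + 100) 0])
    []

-- ===== PORT B =====
-- Python's stack list is transliterated with the Lean list HEAD at the Python END
-- (append = cons, pop() = tail); Python's stack[m-1-mid] is then Lean index mid.
def cpB_pop (stack : List (Int × Int)) (v : Int) : List (Int × Int) :=
  match stack with
  | [] => []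
  | p :: rest => if p.1 ≤ v then cpB_pop rest v else p :: rest

-- the 'while lo < hi' binary search; lo, hi are nonnegative Python ints, so Nat
-- (with Nat '/' = Python '//' on nonnegatives) is exact
def cpB_bsearch (stack : List (Int × Int)) (t : Int) (lo hi : Nat) : Nat :=
  if lo < hi then
    let mid := (lo + hi) / 2
    if t < (PySem.List.pyGetD stack (mid : Int) (0, 0)).1 then cpB_bsearch stack t lo mid
    else cpB_bsearch stack t (mid + 1) hi
  else lo
termination_by hi - lo

def count_position_alt (positions : List Int) : List Int :=
  let n : Int := positions.length
  let res := (PySem.List.pyRange (n - 1) (-1) (-1)).foldl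
    (fun (st : List Int × List (Int × Int)) i =>
      let counts := st.1
      let stack := st.2
      let pi := PySem.List.pyGetD positions i 0
      let t := pi + 100
      let m := stack.length
      let lo := cpB_bsearch stack t 0 m
      let c : Int := if lo < m then (PySem.List.pyGetD stack (lo : Int) (0, 0)).2 - i else n - i
      (counts.set i.toNat c, (pi, i) :: cpB_pop stack pi))
    (List.replicate positions.length 0, [])
  res.1

-- ===== PRECONDITION & SPEC =====
def Spec_count_position (positions : List Int) (out : List Int) : Prop := out = count_position_alt positions
instance (positions : List Int) (out : List Int) : Decidable (Spec_count_position positions out) := by unfold Spec_count_position; infer_instance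

-- ===== CLAIM (what is proved, stated in full; the proofs are below) =====
def Claim_equal_count_position : Prop := ∀ (positions : List Int), Dom_count_position positions → Spec_count_position positions (count_position positions)

-- ===== LEMMAS AND PROOFS =====

-- the common specification value: length of the ≤ positions[j]+100 prefix of the suffix at j
def cpTW (P : List Int) (j : Nat) : Int :=
  (((P.drop j).takeWhile (fun x => decide (x ≤ P.getD j 0 + 100))).length : Int)

-- the record stack B maintains, defined by the same recursion B's loop performs
def cpRecs (L : List Int) (s : Int) : List (Int × Int) :=
  match L with
  | [] => []
  | x :: rest => (x, s) :: cpB_pop (cpRecs rest (s + 1)) x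

-- index of the first record with value > t, else default
def cpQres (S : List (Int × Int)) (t d : Int) : Int :=
  match S with
  | [] => d
  | p :: rest => if t < p.1 then p.2 else cpQres rest t d

theorem cpA_inner_eq (temp : List Int) (b c : Int) :
    cpA_inner temp b c = c + ((temp.takeWhile (fun x => decide (x ≤ b))).length : Int) := by
  induction temp generalizing c with
  | nil => simp [cpA_inner]
  | cons x rest ih =>
    by_cases h : x > b
    · have : decide (x ≤ b) = false := by simp; omega
      simp [cpA_inner, h, this]
    · have hx : decide (x ≤ b) = true := by simp; omega
      simp [cpA_inner, h, hx, ih]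
      omega

theorem cpB_pop_pairwise {R : Int × Int → Int × Int → Prop} {S : List (Int × Int)} (v : Int)
    (h : S.Pairwise R) : (cpB_pop S v).Pairwise R := by
  induction S with
  | nil => simp [cpB_pop]
  | cons p rest ih =>
    rw [List.pairwise_cons] at h
    by_cases hp : p.1 ≤ v
    · simpa [cpB_pop, hp] using ih h.2
    · simpa [cpB_pop, hp] using (List.pairwise_cons.mpr h)

theorem cpB_pop_head_gt {S : List (Int × Int)} (v : Int)
    (h : S.Pairwise (fun p q => p.1 < q.1)) :
    ∀ p ∈ cpB_pop S v, v < p.1 := by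
  induction S with
  | nil => simp [cpB_pop]
  | cons q rest ih =>
    rw [List.pairwise_cons] at h
    by_cases hq : q.1 ≤ v
    · simpa [cpB_pop, hq] using ih h.2
    · intro p hp
      simp [cpB_pop, hq] at hp
      rcases hp with hp | hp
      · subst hp; omega
      · have := h.1 p hp; omega

theorem cpRecs_sorted (L : List Int) (s : Int) :
    (cpRecs L s).Pairwise (fun p q => p.1 < q.1) := by
  induction L generalizing s with
  | nil => simp [cpRecs]
  | cons x rest ih =>
    rw [cpRecs, List.pairwise_cons]
    exact ⟨cpB_pop_head_gt x (ih (s + 1)), cpB_pop_pairwise x (ih (s + 1))⟩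

theorem cpQres_pop (S : List (Int × Int)) (v t d : Int) (h : v ≤ t) :
    cpQres (cpB_pop S v) t d = cpQres S t d := by
  induction S with
  | nil => rfl
  | cons p rest ih =>
    by_cases hp : p.1 ≤ v
    · have : ¬ t < p.1 := by omega
      simp [cpB_pop, hp, cpQres, this, ih]
    · simp [cpB_pop, hp]

theorem cpQres_recs (L : List Int) (s t : Int) :
    cpQres (cpRecs L s) t (s + (L.length : Int)) =
      s + ((L.takeWhile (fun x => decide (x ≤ t))).length : Int) := by
  induction L generalizing s with
  | nil => simp [cpRecs, cpQres]
  | cons x rest ih =>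
    by_cases h : t < x
    · have : decide (x ≤ t) = false := by simp; omega
      simp [cpRecs, cpQres, h, this]
    · have hx : decide (x ≤ t) = true := by simp; omega
      have hle : x ≤ t := by omega
      have hd : s + ((x :: rest).length : Int) = (s + 1) + (rest.length : Int) := by
        simp; omega
      rw [cpRecs]
      simp only [cpQres, if_neg h, hd, cpQres_pop _ x t _ hle, ih (s + 1)]
      simp [hx]
      omega

-- binary search returns the stated boundary b
theorem cpB_bsearch_correct (S : List (Int × Int)) (t : Int) (lo hi b : Nat)
    (hlob : lo ≤ b) (hbhi : b ≤ hi) (hhi : hi ≤ S.length)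
    (hlt : ∀ k, k < b → ¬ t < (S.getD k (0, 0)).1)
    (hge : ∀ k, b ≤ k → k < S.length → t < (S.getD k (0, 0)).1) :
    cpB_bsearch S t lo hi = b := by
  by_cases h : lo < hi
  · rw [cpB_bsearch]
    simp only [if_pos h]
    have hmidlo : lo ≤ (lo + hi) / 2 := by omega
    have hmidhi : (lo + hi) / 2 < hi := by omega
    have hget : PySem.List.pyGetD S (((lo + hi) / 2 : Nat) : Int) (0, 0) =
        S.getD ((lo + hi) / 2) (0, 0) := PySem.List.pyGetD_natCast ..
    by_cases hp : t < (S.getD ((lo + hi) / 2) (0, 0)).1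
    · have hb : b ≤ (lo + hi) / 2 := by
        by_contra hc
        exact hlt _ (by omega) hp
      rw [if_pos (by rw [hget]; exact hp)]
      exact cpB_bsearch_correct S t lo ((lo + hi) / 2) b hlob hb (by omega) hlt hge
    · have hb : (lo + hi) / 2 + 1 ≤ b := by
        by_contra hc
        exact hp (hge _ (by omega) (by omega))
      rw [if_neg (by rw [hget]; exact hp)]
      exact cpB_bsearch_correct S t ((lo + hi) / 2 + 1) hi b hb hbhi hhi hlt hge
  · rw [cpB_bsearch]
    simp only [if_neg h]
    omega
termination_by hi - lo

-- the findIdx-selection B performs equals cpQres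
theorem cpSel_eq_qres (S : List (Int × Int)) (t d : Int) :
    (if S.findIdx (fun p => decide (t < p.1)) < S.length
      then (S.getD (S.findIdx (fun p => decide (t < p.1))) (0, 0)).2 else d) = cpQres S t d := by
  induction S with
  | nil => simp [cpQres]
  | cons p rest ih =>
    by_cases h : t < p.1
    · simp [List.findIdx_cons, h, cpQres]
    · have hd : decide (t < p.1) = false := by simp; omega
      rw [cpQres, if_neg h, ← ih, List.findIdx_cons, hd]
      simp only [cond_false, List.length_cons, Nat.add_lt_add_iff_right, List.getD_cons_succ]

-- the boundary hypotheses for cpB_bsearch_correct hold at b = findIdx on a sorted stack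
theorem cpFindIdx_lt (S : List (Int × Int)) (t : Int) :
    ∀ k, k < S.findIdx (fun p => decide (t < p.1)) → ¬ t < (S.getD k (0, 0)).1 := by
  intro k hk
  have hklen : k < S.length := lt_of_lt_of_le hk (List.findIdx_le_length ..)
  have h := List.not_of_lt_findIdx hk
  rw [List.getD_eq_getElem?_getD, List.getElem?_eq_getElem hklen]
  simpa using h

theorem cpFindIdx_ge (S : List (Int × Int)) (t : Int)
    (hs : S.Pairwise (fun p q => p.1 < q.1)) :
    ∀ k, S.findIdx (fun p => decide (t < p.1)) ≤ k → k < S.length → t < (S.getD k (0, 0)).1 := by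
  intro k hbk hklen
  have hblen : S.findIdx (fun p => decide (t < p.1)) < S.length := by omega
  have hb : t < (S[S.findIdx (fun p => decide (t < p.1))]).1 := by
    have h := List.findIdx_getElem (p := fun q => decide (t < q.1)) (xs := S) (w := hblen)
    simpa using h
  rw [List.getD_eq_getElem?_getD, List.getElem?_eq_getElem hklen, Option.getD_some]
  rcases Nat.eq_or_lt_of_le hbk with h | h
  · subst h
    exact hb
  · have hlt : (S[S.findIdx (fun p => decide (t < p.1))]).1 < (S[k]).1 :=
      (List.pairwise_iff_getElem.mp hs) _ k hblen hklen h
    omega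

-- one loop step of B, given the stack invariant
theorem cpTW_step (P : List Int) (j : Nat) (hj : j < P.length) :
    (if cpB_bsearch (cpRecs (P.drop (j + 1)) ((j : Int) + 1)) (P.getD j 0 + 100) 0
          (cpRecs (P.drop (j + 1)) ((j : Int) + 1)).length <
        (cpRecs (P.drop (j + 1)) ((j : Int) + 1)).length
      then (PySem.List.pyGetD (cpRecs (P.drop (j + 1)) ((j : Int) + 1))
            ((cpB_bsearch (cpRecs (P.drop (j + 1)) ((j : Int) + 1)) (P.getD j 0 + 100) 0
              (cpRecs (P.drop (j + 1)) ((j : Int) + 1)).length : Nat) : Int) (0, 0)).2 - (j : Int)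
      else (P.length : Int) - (j : Int)) = cpTW P j := by
  set S := cpRecs (P.drop (j + 1)) ((j : Int) + 1) with hS
  set t := P.getD j 0 + 100 with ht
  have hsorted : S.Pairwise (fun p q => p.1 < q.1) := cpRecs_sorted _ _
  have hbs : cpB_bsearch S t 0 S.length = S.findIdx (fun p => decide (t < p.1)) :=
    cpB_bsearch_correct S t 0 S.length _ (Nat.zero_le _) (List.findIdx_le_length ..)
      le_rfl (cpFindIdx_lt S t) (cpFindIdx_ge S t hsorted)
  rw [hbs]
  have hgd : PySem.List.pyGetD S ((S.findIdx (fun p => decide (t < p.1)) : Nat) : Int) (0, 0) =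
      S.getD (S.findIdx (fun p => decide (t < p.1))) (0, 0) := PySem.List.pyGetD_natCast ..
  rw [hgd]
  have hsel := cpSel_eq_qres S t (P.length : Int)
  have hq : cpQres S t ((P.length : Int)) =
      ((j : Int) + 1) + (((P.drop (j + 1)).takeWhile (fun x => decide (x ≤ t))).length : Int) := by
    have hlen : ((j : Int) + 1) + ((P.drop (j + 1)).length : Int) = (P.length : Int) := by
      rw [List.length_drop]; omega
    rw [← hlen, hS, cpQres_recs]
  rw [← apply_ite (fun z : Int => z - (j : Int)) (S.findIdx (fun p => decide (t < p.1)) < S.length)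
        ((S.getD (S.findIdx (fun p => decide (t < p.1))) (0, 0)).2) ((P.length : Int)),
      hsel, hq]
  have hdropj : P.drop j = P[j] :: P.drop (j + 1) := List.drop_eq_getElem_cons hj
  have hgdj : P.getD j 0 = P[j] := by
    simp [List.getD_eq_getElem?_getD, List.getElem?_eq_getElem hj]
  have hx : decide (P[j] ≤ t) = true := by rw [ht, hgdj]; simp
  rw [cpTW, ← ht, hdropj, List.takeWhile_cons, hx]
  simp only [if_true, List.length_cons]
  push_cast
  omega

-- B's fold, peeled from index j-1 down to 0
theorem cpLoop (P : List Int) (j : Nat) (hj : j ≤ P.length) (C : List Int)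
    (hC : C.length = P.length) :
    ((PySem.List.pyRange ((j : Int) - 1) (-1) (-1)).foldl
      (fun (st : List Int × List (Int × Int)) i =>
        let counts := st.1
        let stack := st.2
        let pi := PySem.List.pyGetD P i 0
        let t := pi + 100
        let m := stack.length
        let lo := cpB_bsearch stack t 0 m
        let c : Int := if lo < m then (PySem.List.pyGetD stack (lo : Int) (0, 0)).2 - i
          else (P.length : Int) - i
        (counts.set i.toNat c, (pi, i) :: cpB_pop stack pi))
      (C, cpRecs (P.drop j) (j : Int))).1 =
    (List.range j).map (cpTW P) ++ C.drop j := by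
  induction j generalizing C with
  | zero =>
    rw [PySem.List.pyRange_neg_one_eq_nil (by norm_num)]
    simp
  | succ j ih =>
    have hjlt : j < P.length := by omega
    have hpi : PySem.List.pyGetD P (j : Int) 0 = P.getD j 0 := PySem.List.pyGetD_natCast ..
    have htoNat : ((j : Int)).toNat = j := by simp
    have hdropj : P.drop j = P[j] :: P.drop (j + 1) := List.drop_eq_getElem_cons hjlt
    have hgdj : P.getD j 0 = P[j] := by
      simp [List.getD_eq_getElem?_getD, List.getElem?_eq_getElem hjlt]
    have hrecs : cpRecs (P.drop j) (j : Int) =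
        (P.getD j 0, (j : Int)) :: cpB_pop (cpRecs (P.drop (j + 1)) ((j : Int) + 1)) (P.getD j 0) := by
      rw [hdropj, cpRecs, hgdj]
    have hcast : ((j + 1 : Nat) : Int) = (j : Int) + 1 := by push_cast; ring
    have hcons : PySem.List.pyRange (((j + 1 : Nat) : Int) - 1) (-1) (-1) =
        (j : Int) :: PySem.List.pyRange ((j : Int) - 1) (-1) (-1) := by
      rw [hcast]
      have h1 : (j : Int) + 1 - 1 = (j : Int) := by ring
      rw [h1, PySem.List.pyRange_neg_one_cons (by omega)]
    have hstate :
        (fun (st : List Int × List (Int × Int)) i =>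
          let counts := st.1
          let stack := st.2
          let pi := PySem.List.pyGetD P i 0
          let t := pi + 100
          let m := stack.length
          let lo := cpB_bsearch stack t 0 m
          let c : Int := if lo < m then (PySem.List.pyGetD stack (lo : Int) (0, 0)).2 - i
            else (P.length : Int) - i
          (counts.set i.toNat c, (pi, i) :: cpB_pop stack pi))
          (C, cpRecs (P.drop (j + 1)) ((j : Int) + 1)) (j : Int) =
        (C.set j (cpTW P j), cpRecs (P.drop j) (j : Int)) := by
      simp only [hpi, htoNat, Prod.mk.injEq]
      refine ⟨?_, hrecs.symm⟩
      rw [cpTW_step P j hjlt]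
    have hsets : (C.set j (cpTW P j)).drop j = cpTW P j :: C.drop (j + 1) := by
      rw [List.drop_set, if_neg (lt_irrefl j), Nat.sub_self,
        List.drop_eq_getElem_cons (show j < C.length by omega), List.set_cons_zero]
    rw [hcons, hcast, List.foldl_cons]
    change (List.foldl _
      ((fun (st : List Int × List (Int × Int)) i =>
          let counts := st.1
          let stack := st.2
          let pi := PySem.List.pyGetD P i 0
          let t := pi + 100
          let m := stack.length
          let lo := cpB_bsearch stack t 0 m
          let c : Int := if lo < m then (PySem.List.pyGetD stack (lo : Int) (0, 0)).2 - i
            else (P.length : Int) - i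
          (counts.set i.toNat c, (pi, i) :: cpB_pop stack pi))
        (C, cpRecs (P.drop (j + 1)) ((j : Int) + 1)) (j : Int)) _).1 = _
    rw [hstate, ih (by omega) (C.set j (cpTW P j)) (by simp [hC]), hsets, List.range_succ]
    simp

theorem count_position_eq_map (P : List Int) :
    count_position P = (List.range P.length).map (cpTW P) := by
  show (PySem.List.pyRange 0 (P.length : Int) 1).foldl
      (fun counts i =>
        counts ++ [cpA_inner (PySem.List.slice P (some i) none)
          (PySem.List.pyGetD P i 0 + 100) 0]) [] = _
  rw [PySem.List.pyRange_zero_natCast]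
  rw [PySem.List.foldl_append_singleton_eq_map]
  rw [List.map_map]
  apply List.map_congr_left
  intro j hj
  rw [List.mem_range] at hj
  simp only [Function.comp_apply]
  rw [PySem.List.slice_from_natCast, PySem.List.pyGetD_natCast, cpA_inner_eq]
  simp [cpTW]

theorem count_position_alt_eq_map (P : List Int) :
    count_position_alt P = (List.range P.length).map (cpTW P) := by
  unfold count_position_alt
  have h := cpLoop P P.length le_rfl (List.replicate P.length 0) (by simp)
  simp only [List.drop_length, cpRecs] at h
  simpa using h

-- ===== VERDICT (by name: the statement is the Claim_ definition above) =====
theorem count_position_spec : Claim_equal_count_position := by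
  intro positions _
  unfold Spec_count_position
  rw [count_position_eq_map, count_position_alt_eq_map]
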